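-- pv_equiv track=rewrite | github.com/annaulazar/algorithms_practice | Trenirovka_7_0/Greedy_backpack/task_h-stress.py | count_good_days
-- ===== SOURCE A (Python) =====
-- def count_good_days(string: str) -> (int, int): # (кол-во хороших дней, если начинает Вася, если начинает Маша)
--     v, m = 0, 0
--     for i in range(len(string)):
--         if i % 2 and string[i] == 'S':
--             m += 1
--         elif i % 2 == 0 and string[i] == 'S':
--             v += 1
--     return v, m
-- ===== SOURCE B (Python) =====
-- def count_good_days(string: str) -> (int, int):
--     v = string[0::2].count('S')
--     m = string[1::2].count('S')
--     return v, m
-- ===== Notes on version B (the rewrite author's own statement) =====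
-- stated objective: faster
-- what changed: Replaces the single parity-branching index loop by two independent strided-slice passes, counting 'S' in string[0::2] and in string[1::2].
import Mathlib
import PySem

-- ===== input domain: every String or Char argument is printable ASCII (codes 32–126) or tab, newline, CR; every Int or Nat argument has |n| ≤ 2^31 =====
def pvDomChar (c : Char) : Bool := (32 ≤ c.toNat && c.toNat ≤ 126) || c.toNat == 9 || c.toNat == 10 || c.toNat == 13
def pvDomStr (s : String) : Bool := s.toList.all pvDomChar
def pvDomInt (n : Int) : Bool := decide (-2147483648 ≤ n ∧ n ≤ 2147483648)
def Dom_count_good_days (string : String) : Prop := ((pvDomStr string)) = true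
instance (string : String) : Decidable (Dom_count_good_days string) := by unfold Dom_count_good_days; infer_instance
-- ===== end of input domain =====

-- B replaces A's single parity-branching index loop by two independent strided-slice counts (idiomatic).

-- ===== PORT A =====
def count_good_days (string : String) : Int × Int :=
  let cs := string.toList
  (PySem.List.pyRange 0 (cs.length : Int) 1).foldl
    (fun (vm : Int × Int) i =>
      if i % 2 ≠ 0 ∧ PySem.List.pyGet? cs i = some 'S' then (vm.1, vm.2 + 1)
      else if i % 2 = 0 ∧ PySem.List.pyGet? cs i = some 'S' then (vm.1 + 1, vm.2)
      else vm)
    ((0 : Int), (0 : Int))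

-- ===== PORT B =====
-- string[0::2] / string[1::2] never fail in Python (step ≠ 0), so the `.getD []` is unreachable.
def count_good_days_alt (string : String) : Int × Int :=
  let v : Int := (((PySem.List.slice? string.toList (some 0) none 2).getD []).count 'S' : Nat)
  let m : Int := (((PySem.List.slice? string.toList (some 1) none 2).getD []).count 'S' : Nat)
  (v, m)

-- ===== PRECONDITION & SPEC =====
def Spec_count_good_days (string : String) (out : Int × Int) : Prop := out = count_good_days_alt string
instance (string : String) (out : Int × Int) : Decidable (Spec_count_good_days string out) := by unfold Spec_count_good_days; infer_instance

-- ===== CLAIM (what is proved, stated in full; the proofs are below) =====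
def Claim_equal_count_good_days : Prop := ∀ (string : String), Dom_count_good_days string → Spec_count_good_days string (count_good_days string)

-- ===== LEMMAS AND PROOFS =====

/-- The even-position elements of a list (proof-side helper). -/
def pvEvens {α : Type} : List α → List α
  | [] => []
  | [a] => [a]
  | a :: _ :: t => a :: pvEvens t

theorem pv_filterMap_core {α : Type} (xs : List α) :
    (List.range ((xs.length + 1) / 2)).filterMap (fun k => xs[2 * k]?) = pvEvens xs := by
  induction xs using pvEvens.induct with
  | case1 => simp [pvEvens]
  | case2 a => simp [pvEvens, List.range_succ]
  | case3 a b t ih =>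
    have hlen : ((a :: b :: t).length + 1) / 2 = ((t.length + 1) / 2) + 1 := by
      simp; omega
    rw [hlen, List.range_succ_eq_map]
    simp only [List.filterMap_cons, List.filterMap_map]
    simp only [Function.comp_def]
    simp only [show ∀ k, 2 * (k + 1) = 2 * k + 1 + 1 from fun k => by omega]
    simp [pvEvens, ih]

theorem pv_slice2_zero {α : Type} (xs : List α) :
    PySem.List.slice? xs (some 0) none 2 = some (pvEvens xs) := by
  unfold PySem.List.slice? PySem.List.sliceIndices
  norm_num
  have hc : (if 0 < xs.length then (((xs.length : Int) + 2 - 1) / 2).toNat else 0) = (xs.length + 1) / 2 := by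
    split <;> omega
  have hf : ∀ x : Nat, xs[(2 * (x:Int)).toNat]? = xs[2 * x]? := by
    intro k; congr 1
  simp only [hc, hf]
  exact pv_filterMap_core xs

theorem pv_slice2_one {α : Type} (xs : List α) :
    PySem.List.slice? xs (some 1) none 2 = some (pvEvens xs.tail) := by
  cases xs with
  | nil => rfl
  | cons a t =>
    unfold PySem.List.slice? PySem.List.sliceIndices
    norm_num
    have hc : (if 0 < t.length then (((t.length : Int) + 2 - 1) / 2).toNat else 0) = (t.length + 1) / 2 := by
      split <;> omega
    have hf : ∀ x : Nat, (a :: t)[(1 + 2 * (x:Int)).toNat]? = t[2 * x]? := by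
      intro k
      have h : (1 + 2 * (k:Int)).toNat = 2 * k + 1 := by omega
      simp [h]
    simp only [hc, hf]
    exact pv_filterMap_core t

theorem pv_shift {β : Type} (f g : β → Int → β) (n : Nat)
    (h : ∀ (s : β) (k : Nat), k < n → f s (2 + (k : Int)) = g s (k : Int)) (s : β) :
    (PySem.List.pyRange 2 ((n : Int) + 2) 1).foldl f s
      = (PySem.List.pyRange 0 (n : Int) 1).foldl g s := by
  induction n with
  | zero =>
    rw [PySem.List.pyRange_one_eq_nil (by norm_num), PySem.List.pyRange_one_eq_nil (by norm_num)]
    rfl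
  | succ n ih =>
    have e1 : ((n + 1 : Nat) : Int) + 2 = ((n : Int) + 2) + 1 := by push_cast; ring
    have e2 : ((n + 1 : Nat) : Int) = (n : Int) + 1 := by push_cast; ring
    rw [e1, e2, PySem.List.pyRange_one_succ_right (by omega),
        PySem.List.pyRange_one_succ_right (by omega),
        List.foldl_append, List.foldl_append,
        ih (fun s k hk => h s k (by omega))]
    simp only [List.foldl_cons, List.foldl_nil]
    rw [show ((n : Int) + 2) = 2 + (n : Int) from by ring]
    exact h _ n (by omega)

theorem pv_loopA (cs : List Char) (v m : Int) :
    (PySem.List.pyRange 0 (cs.length : Int) 1).foldl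
      (fun (vm : Int × Int) i =>
        if i % 2 ≠ 0 ∧ PySem.List.pyGet? cs i = some 'S' then (vm.1, vm.2 + 1)
        else if i % 2 = 0 ∧ PySem.List.pyGet? cs i = some 'S' then (vm.1 + 1, vm.2)
        else vm)
      (v, m)
    = (v + ((pvEvens cs).count 'S' : Nat), m + ((pvEvens cs.tail).count 'S' : Nat)) := by
  induction cs using pvEvens.induct generalizing v m with
  | case1 =>
    simp [PySem.List.pyRange_one_eq_nil, pvEvens]
  | case2 a =>
    rw [show ((([a] : List Char).length : Int)) = 0 + 1 by simp]
    rw [PySem.List.pyRange_one_singleton]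
    by_cases h : a = 'S' <;>
      simp [h, pvEvens, PySem.List.pyGet?, PySem.List.pyIdx?]
  | case3 a b t ih =>
    have hpe : ∀ (x : Char) (l : List Char), pvEvens (x :: l) = x :: pvEvens l.tail := by
      intro x l; cases l <;> rfl
    have hlen : (((a :: b :: t).length : Int)) = (t.length : Int) + 2 := by simp; ring
    rw [hlen]
    rw [PySem.List.pyRange_one_cons (by omega), PySem.List.pyRange_one_cons (by omega)]
    rw [List.foldl_cons, List.foldl_cons]
    rw [show ((0 : Int) + 1 + 1) = 2 by norm_num]
    have hstep : ∀ (s : Int × Int) (k : Nat), k < t.length →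
        (fun (vm : Int × Int) i =>
          if i % 2 ≠ 0 ∧ PySem.List.pyGet? (a :: b :: t) i = some 'S' then (vm.1, vm.2 + 1)
          else if i % 2 = 0 ∧ PySem.List.pyGet? (a :: b :: t) i = some 'S' then (vm.1 + 1, vm.2)
          else vm) s (2 + (k : Int))
        = (fun (vm : Int × Int) i =>
          if i % 2 ≠ 0 ∧ PySem.List.pyGet? t i = some 'S' then (vm.1, vm.2 + 1)
          else if i % 2 = 0 ∧ PySem.List.pyGet? t i = some 'S' then (vm.1 + 1, vm.2)
          else vm) s ((k : Nat) : Int) := by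
      intro s k _
      have h1 : (2 + (k : Int)) = ((k + 2 : Nat) : Int) := by push_cast; ring
      have hm : ((k + 2 : Nat) : Int) % 2 = ((k : Nat) : Int) % 2 := by omega
      simp only [h1, hm, PySem.List.pyGet?_natCast, List.getElem?_cons_succ]
    rw [pv_shift _ (fun (vm : Int × Int) i =>
          if i % 2 ≠ 0 ∧ PySem.List.pyGet? t i = some 'S' then (vm.1, vm.2 + 1)
          else if i % 2 = 0 ∧ PySem.List.pyGet? t i = some 'S' then (vm.1 + 1, vm.2)
          else vm) t.length hstep]
    have hg0 : PySem.List.pyGet? (a :: b :: t) 0 = some a := by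
      rw [show ((0 : Int)) = ((0 : Nat) : Int) from by norm_num, PySem.List.pyGet?_natCast]
      rfl
    have hg1 : PySem.List.pyGet? (a :: b :: t) (0 + 1) = some b := by
      rw [show ((0 : Int) + 1) = ((1 : Nat) : Int) from by norm_num, PySem.List.pyGet?_natCast]
      rfl
    simp only [hg0, hg1]
    have ih' : ∀ p : Int × Int,
        List.foldl
          (fun (vm : Int × Int) i =>
            if i % 2 ≠ 0 ∧ PySem.List.pyGet? t i = some 'S' then (vm.1, vm.2 + 1)
            else if i % 2 = 0 ∧ PySem.List.pyGet? t i = some 'S' then (vm.1 + 1, vm.2)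
            else vm) p (PySem.List.pyRange 0 (t.length : Int) 1)
          = (p.1 + ((pvEvens t).count 'S' : Nat), p.2 + ((pvEvens t.tail).count 'S' : Nat)) := by
      rintro ⟨x, y⟩; exact ih x y
    rw [ih']
    by_cases ha : a = 'S' <;> by_cases hb : b = 'S' <;>
      simp [ha, hb, hpe, List.count_cons, Prod.ext_iff] <;> omega

-- ===== VERDICT (by name: the statement is the Claim_ definition above) =====
theorem count_good_days_spec : Claim_equal_count_good_days := by
  intro s _
  unfold Spec_count_good_days count_good_days count_good_days_alt
  simp only [pv_slice2_zero, pv_slice2_one, Option.getD_some]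
  rw [pv_loopA]
  simp
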